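-- pv_equiv track=rewrite | github.com/I-Agreed/Random-Python-Things | snake.py | getGridString
-- ===== SOURCE A (Python) =====
-- def getGridString(num):
--     a = str()
--     for i in range(0,num):
--         if not i + 1 == num:
--             a = a + "a"
--         else:
--             a = a + "b"
--     return a
-- ===== SOURCE B (Python) =====
-- def getGridString(num):
--     if num <= 0:
--         return ""
--     return "a" * (num - 1) + "b"
-- ===== Notes on version B (the rewrite author's own statement) =====
-- stated objective: simpler
-- what changed: Replaces the per-index loop with a branch by a closed-form string expression: "a"*(num-1)+"b" for num > 0, empty string otherwise.
import Mathlib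
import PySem

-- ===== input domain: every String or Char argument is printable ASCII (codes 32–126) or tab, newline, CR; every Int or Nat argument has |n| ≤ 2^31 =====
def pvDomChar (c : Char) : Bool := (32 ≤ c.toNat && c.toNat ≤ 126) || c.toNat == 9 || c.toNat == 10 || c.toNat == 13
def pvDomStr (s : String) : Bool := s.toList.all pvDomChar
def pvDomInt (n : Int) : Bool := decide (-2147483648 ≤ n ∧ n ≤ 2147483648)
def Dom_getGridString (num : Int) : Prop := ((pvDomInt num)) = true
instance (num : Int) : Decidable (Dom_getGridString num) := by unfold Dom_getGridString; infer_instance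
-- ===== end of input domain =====

-- B computes the result in closed form ("a"*(num-1)+"b", empty for num <= 0) instead of A's per-index loop; objective: simpler.
-- ===== PORT A =====
def getGridString (num : Int) : String :=
  (PySem.List.pyRange 0 num 1).foldl
    (fun a i => if !(i + 1 == num) then a ++ "a" else a ++ "b") ""

-- ===== PORT B =====
def getGridString_alt (num : Int) : String :=
  if num ≤ 0 then ""
  else String.ofList (PySem.List.pyRepeat ['a'] (num - 1)) ++ "b"

-- ===== PRECONDITION & SPEC =====
def Spec_getGridString (num : Int) (out : String) : Prop := out = getGridString_alt num
instance (num : Int) (out : String) : Decidable (Spec_getGridString num out) := by unfold Spec_getGridString; infer_instance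

-- ===== CLAIM (what is proved, stated in full; the proofs are below) =====
def Claim_equal_getGridString : Prop := ∀ (num : Int), Dom_getGridString num → Spec_getGridString num (getGridString num)

-- ===== LEMMAS AND PROOFS =====

-- ===== VERDICT (by name: the statement is the Claim_ definition above) =====
-- All "a"s until the last index: each i in range(0, n) with (n : Int) < num appends "a".
lemma loopA (num : Int) (n : Nat) (h : (n : Int) < num) (acc : String) :
    (PySem.List.pyRange 0 (n : Int) 1).foldl
      (fun a i => if !(i + 1 == num) then a ++ "a" else a ++ "b") acc
      = acc ++ String.ofList (List.replicate n 'a') := by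
  induction n generalizing acc with
  | zero =>
      rw [PySem.List.pyRange_one_eq_nil (by norm_num)]
      apply String.toList_injective; simp
  | succ k ih =>
      rw [show ((k + 1 : Nat) : Int) = (k : Int) + 1 by push_cast; ring,
        PySem.List.pyRange_one_succ_right (by positivity), List.foldl_append,
        ih (by push_cast at h ⊢; omega)]
      have hne : ((k : Int) + 1 == num) = false := by
        simp only [beq_eq_false_iff_ne, ne_eq]
        push_cast at h; omega
      simp only [List.foldl_cons, List.foldl_nil, hne, Bool.not_false, if_pos]
      apply String.toList_injective
      simp [List.replicate_succ']

theorem getGridString_spec : Claim_equal_getGridString := by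
  intro num _
  unfold Spec_getGridString getGridString getGridString_alt
  by_cases h : num ≤ 0
  · rw [PySem.List.pyRange_one_eq_nil h, if_pos h]; rfl
  · rw [if_neg h]
    push_neg at h
    have hnum : num = ((num - 1).toNat : Int) + 1 := by omega
    rw [PySem.List.pyRepeat_singleton]
    calc (PySem.List.pyRange 0 num 1).foldl
          (fun a i => if !(i + 1 == num) then a ++ "a" else a ++ "b") ""
        = (PySem.List.pyRange 0 (((num - 1).toNat : Int) + 1) 1).foldl
          (fun a i => if !(i + 1 == num) then a ++ "a" else a ++ "b") "" := by rw [← hnum]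
      _ = String.ofList (List.replicate (num - 1).toNat 'a') ++ "b" := by
          rw [PySem.List.pyRange_one_succ_right (by positivity), List.foldl_append,
            loopA num (num - 1).toNat (by omega)]
          have heq : (((num - 1).toNat : Int) + 1 == num) = true := by
            simp only [beq_iff_eq]; omega
          simp only [List.foldl_cons, List.foldl_nil, heq, Bool.not_true, if_neg,
            Bool.false_eq_true, not_false_eq_true]
          apply String.toList_injective; simp
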